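-- pv_equiv track=rewrite | github.com/nyu-cds/assignment5 | file1.py | kbits
-- ===== SOURCE A (Python) =====
-- import itertools
--
-- def kbits(n, k):
--     result = []
--     for bits in itertools.combinations(range(n), k):
--         s = ['1'] * n
--         for bit in bits:
--             s[bit] = '0'
--         result.append(''.join(s))
--     return result
-- ===== SOURCE B (Python) =====
-- def kbits(n, k):
--     m = max(n, 0)
--     states = [(k, '')]
--     for i in range(m):
--         rem = m - i
--         nxt = []
--         for zeros, prefix in states:
--             if zeros > 0:
--                 nxt.append((zeros - 1, prefix + '0'))
--             if rem - 1 >= zeros: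
--                 nxt.append((zeros, prefix + '1'))
--         states = nxt
--     return [prefix for zeros, prefix in states if zeros == 0]
-- ===== Notes on version B (the rewrite author's own statement) =====
-- stated objective: alternative
-- what changed: Replaces the per-combination enumeration (itertools.combinations of zero positions, patching a ['1']*n list for each) with an iterative breadth-wise frontier expansion: a list of (zeros-left, prefix) states is expanded one bit position at a time, pruning branches that can no longer place the required zeros.
import Mathlib
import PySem

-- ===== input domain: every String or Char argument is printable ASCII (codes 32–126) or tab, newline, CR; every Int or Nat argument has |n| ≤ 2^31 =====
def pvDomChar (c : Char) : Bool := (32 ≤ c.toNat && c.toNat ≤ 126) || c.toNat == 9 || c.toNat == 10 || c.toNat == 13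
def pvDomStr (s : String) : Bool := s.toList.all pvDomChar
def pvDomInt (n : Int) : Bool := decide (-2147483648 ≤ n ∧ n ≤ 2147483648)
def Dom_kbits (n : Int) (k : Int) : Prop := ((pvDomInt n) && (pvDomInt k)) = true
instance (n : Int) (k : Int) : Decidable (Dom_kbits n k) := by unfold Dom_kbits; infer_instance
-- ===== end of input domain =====

-- B replaces the combinations-of-zero-positions enumeration with a pfx-building
-- recursion threading the count of zeros still to place (alternative decomposition, same cost).


-- ===== PORT A =====
-- itertools.combinations(xs, r): all r-subsets of xs in lexicographic order of positions
-- (library call, ported as the standard recursive characterisation with the same output order).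
def combA : List Int → Nat → List (List Int)
  | _, 0 => [[]]
  | [], _ + 1 => []
  | x :: xs, r + 1 =>
      -- itertools.combinations returns no tuples at all when r exceeds the pool size;
      -- this short-circuit is part of the library's semantics (and keeps the port evaluable)
      if (x :: xs).length < r + 1 then []
      else ((combA xs r).map (fun c => x :: c)) ++ combA xs (r + 1)

def kbits (n : Int) (k : Int) : List String :=
  (combA (PySem.List.pyRange 0 n 1) k.toNat).map (fun bits =>
    let s := bits.foldl (fun s bit => s.set bit.toNat '0') (List.replicate n.toNat '1')
    String.mk s)

-- ===== PORT B =====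
-- one expansion step of the frontier: each (zeros-left, prefix) state grows by one position
def stepB (rem : Int) (states : List (Int × List Char)) : List (Int × List Char) :=
  states.foldl (fun nxt zp =>
    (nxt ++ (if zp.1 > 0 then [(zp.1 - 1, zp.2 ++ ['0'])] else []))
        ++ (if rem - 1 ≥ zp.1 then [(zp.1, zp.2 ++ ['1'])] else [])) []

def kbits_alt (n : Int) (k : Int) : List String :=
  let m := (max n 0).toNat
  let states := (List.range m).foldl (fun st i => stepB ((m : Int) - (i : Nat)) st) [(k, [])]
  (states.filter (fun zp => zp.1 = 0)).map (fun zp => String.mk zp.2)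

-- ===== PRECONDITION & SPEC =====
-- Pre_ excludes exactly k < 0, where A raises ValueError (itertools.combinations rejects negative r).
def Pre_kbits (n : Int) (k : Int) : Prop := 0 ≤ k
instance (n : Int) (k : Int) : Decidable (Pre_kbits n k) := by unfold Pre_kbits; infer_instance
def pvWitness_kbits : Int × Int := (3, 1)

def Spec_kbits (n : Int) (k : Int) (out : List String) : Prop := out = kbits_alt n k
instance (n : Int) (k : Int) (out : List String) : Decidable (Spec_kbits n k out) := by unfold Spec_kbits; infer_instance

-- ===== CLAIM (what is proved, stated in full; the proofs are below) =====
def Claim_equal_kbits : Prop := ∀ (n : Int) (k : Int), Dom_kbits n k → Pre_kbits n k → Spec_kbits n k (kbits n k)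


-- ===== LEMMAS AND PROOFS =====

-- proof-side recursive view of B: DFS over remaining positions (leaf order = frontier order)
def goB : Nat → Int → List Char → List String
  | 0, zeros, pfx => if zeros = 0 then [String.mk pfx] else []
  | m + 1, zeros, pfx =>
      (if zeros > 0 then goB m (zeros - 1) (pfx ++ ['0']) else []) ++
      (if (m : Int) ≥ zeros then goB m zeros (pfx ++ ['1']) else [])

-- proof-side view of the fold: apply steps with rem = j, j-1, …, 1
def applySteps : Nat → List (Int × List Char) → List (Int × List Char)
  | 0, s => s
  | j + 1, s => applySteps j (stepB ((j : Nat) + 1) s)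

-- combinations of a too-short list are empty
theorem combA_eq_nil (xs : List Int) (r : Nat) (h : xs.length < r) : combA xs r = [] := by
  induction xs generalizing r with
  | nil => cases r with
    | zero => omega
    | succ r => rfl
  | cons x xs ih =>
    cases r with
    | zero => simp at h
    | succ r =>
      simp only [List.length_cons] at h
      simp [combA, h]

-- every chosen position comes from the source list
theorem combA_subset (xs : List Int) (r : Nat) (c : List Int) (hc : c ∈ combA xs r) :
    ∀ i ∈ c, i ∈ xs := by
  induction xs generalizing r c with
  | nil =>
    cases r with
    | zero => simp [combA] at hc; simp [hc]
    | succ r => simp [combA] at hc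
  | cons x xs ih =>
    cases r with
    | zero => simp [combA] at hc; simp [hc]
    | succ r =>
      by_cases hg : (x :: xs).length < r + 1
      · rw [combA_eq_nil _ _ hg] at hc
        simp at hc
      simp only [combA, if_neg hg, List.mem_append, List.mem_map] at hc
      rcases hc with ⟨c', hc', rfl⟩ | hc
      · intro i hi
        simp only [List.mem_cons] at hi
        rcases hi with rfl | hi
        · simp
        · simp only [List.mem_cons]; right; exact ih r c' hc' i hi
      · intro i hi
        simp only [List.mem_cons]; right; exact ih (r+1) c hc i hi

-- the cons unfolding of combA, with the short-circuit discharged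
theorem combA_cons (x : Int) (xs : List Int) (r : Nat) :
    combA (x :: xs) (r + 1) = ((combA xs r).map (fun c => x :: c)) ++ combA xs (r + 1) := by
  rw [combA]
  split_ifs with h
  · rw [combA_eq_nil xs r (by simp at h; omega), combA_eq_nil xs (r+1) (by simp at h; omega)]
    simp
  · rfl

-- setting an index inside a mapped range rewrites that one entry
theorem set_map_range (n : Nat) (g : Nat → Char) (j : Nat) (v : Char) :
    ((List.range n).map g).set j v = (List.range n).map (fun i => if i = j then v else g i) := by
  apply List.ext_getElem
  · simp
  · intro i h1 h2
    by_cases hij : i = j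
    · simp [hij]
    · have hji : j ≠ i := fun h => hij h.symm
      simp [hij, hji]

-- A's inner foldl of list.set calls renders the membership function over range n
theorem foldl_set_eq_map (n : Int) (bits : List Int) :
    ∀ g : Nat → Char, (∀ b ∈ bits, 0 ≤ b ∧ b < n) →
    bits.foldl (fun s bit => s.set bit.toNat '0') ((List.range n.toNat).map g) =
      (List.range n.toNat).map (fun (j : Nat) => if (j : Int) ∈ bits then '0' else g j) := by
  induction bits with
  | nil => intro g _; simp
  | cons b bs ih =>
    intro g hb
    simp only [List.foldl_cons]
    rw [set_map_range n.toNat g b.toNat '0',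
        ih _ (fun x hx => hb x (by simp [hx]))]
    apply List.map_congr_left
    intro j hj
    have hb0 : 0 ≤ b := (hb b (by simp)).1
    by_cases h1 : (j : Int) ∈ bs
    · simp [h1]
    · by_cases h2 : j = b.toNat
      · have hjb : (j : Int) = b := by omega
        have hmem : (j : Int) ∈ b :: bs := by simp [hjb]
        rw [if_neg h1, if_pos h2, if_pos hmem]
      · have hjb : (j : Int) ≠ b := by omega
        have hmem : (j : Int) ∉ b :: bs := by simp [h1, hjb]
        rw [if_neg h1, if_neg h2, if_neg hmem]

-- the core correspondence: goB over m remaining positions enumerates the combinations of any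
-- m consecutive integer positions starting at s, rendering each as pfx ++ membership string
theorem goB_eq : ∀ (m : Nat) (s zeros : Int) (pfx : List Char), 0 ≤ zeros →
    goB m zeros pfx =
      (combA (PySem.List.pyRange s (s + m) 1) zeros.toNat).map
        (fun c => String.mk (pfx ++ (PySem.List.pyRange s (s + m) 1).map
            (fun i => if i ∈ c then '0' else '1'))) := by
  intro m
  induction m with
  | zero =>
    intro s zeros pfx hz
    rw [show s + (0 : Nat) = s by simp, PySem.List.pyRange_one_eq_nil le_rfl]
    by_cases h0 : zeros = 0
    · simp [goB, h0, combA]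
    · have : zeros.toNat = (zeros.toNat - 1) + 1 := by omega
      rw [this]
      simp [goB, h0, combA]
  | succ m ih =>
    intro s zeros pfx hz
    have hlt : s < s + ((m : Nat) + 1 : Nat) := by push_cast; omega
    have hsh : s + ((m : Nat) + 1 : Nat) = (s + 1) + (m : Nat) := by push_cast; ring
    rw [PySem.List.pyRange_one_cons hlt, hsh]
    by_cases h0 : zeros = 0
    · subst h0
      have hguard : (m : Int) ≥ 0 := by positivity
      simp only [goB, gt_iff_lt, lt_irrefl, if_false, hguard, if_pos, List.nil_append,
        Int.toNat_zero, combA]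
      rw [ih (s+1) 0 (pfx ++ ['1']) le_rfl]
      simp [combA]
    · have hzpos : 0 < zeros := by omega
      have hzn : zeros.toNat = (zeros - 1).toNat + 1 := by omega
      rw [hzn]
      simp only [goB]
      rw [combA_cons]
      simp only [List.map_append, List.map_map]
      congr 1
      · -- '0' branch ↔ combinations containing s
        rw [if_pos hzpos, ih (s+1) (zeros-1) (pfx ++ ['0']) (by omega)]
        apply List.map_congr_left
        intro c _
        simp only [Function.comp_apply]
        have htail : (PySem.List.pyRange (s+1) ((s+1) + (m : Nat)) 1).map
              (fun i => if i ∈ s :: c then '0' else '1')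
            = (PySem.List.pyRange (s+1) ((s+1) + (m : Nat)) 1).map
              (fun i => if i ∈ c then '0' else '1') := by
          apply List.map_congr_left
          intro i hi
          have h1 : s + 1 ≤ i := (PySem.List.mem_pyRange_one.mp hi).1
          have hne : i ≠ s := by omega
          simp [hne]
        apply congrArg String.mk
        rw [List.map_cons]
        have hhead : (if s ∈ s :: c then '0' else '1') = '0' := by simp
        rw [hhead, htail, List.append_assoc, List.singleton_append]
      · -- '1' branch ↔ combinations avoiding s
        by_cases hguard : (m : Int) ≥ zeros
        · rw [if_pos hguard, ih (s+1) zeros (pfx ++ ['1']) hz, hzn]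
          apply List.map_congr_left
          intro c hc
          have hsub := combA_subset _ _ c hc
          have hs_nc : s ∉ c := by
            intro hmem
            have := (PySem.List.mem_pyRange_one.mp (hsub s hmem)).1
            omega
          apply congrArg String.mk
          rw [List.map_cons]
          have hhead : (if s ∈ c then '0' else '1') = '1' := by simp [hs_nc]
          rw [hhead, List.append_assoc, List.singleton_append]
        · rw [if_neg hguard]
          have hlen : (PySem.List.pyRange (s+1) ((s+1) + (m : Nat)) 1).length
              < (zeros - 1).toNat + 1 := by
            rw [PySem.List.length_pyRange_one]; omega
          rw [combA_eq_nil _ _ hlen]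
          simp

-- A's output as a render over pyRange 0 n 1
theorem kbits_eq_render (n : Int) (k : Int) :
    kbits n k = (combA (PySem.List.pyRange 0 n 1) k.toNat).map
        (fun c => String.mk ((PySem.List.pyRange 0 n 1).map
            (fun i => if i ∈ c then '0' else '1'))) := by
  unfold kbits
  apply List.map_congr_left
  intro c hc
  have hmem : ∀ b ∈ c, 0 ≤ b ∧ b < n := by
    intro b hb
    have := PySem.List.mem_pyRange_one.mp (combA_subset _ _ c hc b hb)
    omega
  have hrepl : List.replicate n.toNat '1' = (List.range n.toNat).map (fun _ => '1') := by
    simp [List.map_const']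
  simp only [hrepl]
  rw [foldl_set_eq_map n c (fun _ => '1') hmem]
  congr 1
  rw [PySem.List.pyRange_one]
  simp

-- stepB's foldl-with-append is a flatMap over the two conditional children
theorem stepB_eq_flatMap (rem : Int) (states : List (Int × List Char)) :
    stepB rem states = states.flatMap (fun zp =>
      (if zp.1 > 0 then [(zp.1 - 1, zp.2 ++ ['0'])] else []) ++
      (if rem - 1 ≥ zp.1 then [(zp.1, zp.2 ++ ['1'])] else [])) := by
  unfold stepB
  suffices h : ∀ (acc : List (Int × List Char)),
      states.foldl (fun nxt zp =>
        (nxt ++ (if zp.1 > 0 then [(zp.1 - 1, zp.2 ++ ['0'])] else []))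
            ++ (if rem - 1 ≥ zp.1 then [(zp.1, zp.2 ++ ['1'])] else [])) acc
        = acc ++ states.flatMap (fun zp =>
            (if zp.1 > 0 then [(zp.1 - 1, zp.2 ++ ['0'])] else []) ++
            (if rem - 1 ≥ zp.1 then [(zp.1, zp.2 ++ ['1'])] else [])) by
    simpa using h []
  induction states with
  | nil => intro acc; simp
  | cons zp tl ih => intro acc; simp [List.append_assoc, List.flatMap_def]

-- the range-fold of kbits_alt is applySteps
theorem fold_eq_applySteps : ∀ (j : Nat) (s : List (Int × List Char)),
    (List.range j).foldl (fun st i => stepB ((j : Int) - (i : Nat)) st) s = applySteps j s := by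
  intro j
  induction j with
  | zero => intro s; simp [applySteps]
  | succ j ih =>
    intro s
    rw [List.range_succ_eq_map]
    simp only [List.foldl_cons, List.foldl_map]
    have hf : (fun st (i : Nat) => stepB (((j + 1 : Nat) : Int) - ((i + 1 : Nat) : Nat)) st)
        = (fun st (i : Nat) => stepB ((j : Int) - (i : Nat)) st) := by
      funext st i
      congr 1
      push_cast
      ring
    have h0 : (((j + 1 : Nat) : Int) - ((0 : Nat) : Nat)) = ((j : Nat) + 1 : Int) := by norm_num
    rw [hf, h0, ih]
    rfl

-- harvesting the frontier after j more levels = DFS from each state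
theorem applySteps_harvest : ∀ (j : Nat) (s : List (Int × List Char)),
    ((applySteps j s).filter (fun zp => zp.1 = 0)).map (fun zp => String.mk zp.2)
      = s.flatMap (fun zp => goB j zp.1 zp.2) := by
  intro j
  induction j with
  | zero =>
    intro s
    induction s with
    | nil => simp [applySteps]
    | cons zp tl ih =>
      by_cases h : zp.1 = 0 <;>
        simp [applySteps, goB, h] <;>
        simpa [applySteps] using ih
  | succ j ih =>
    intro s
    show ((applySteps j (stepB ((j : Nat) + 1) s)).filter _).map _ = _
    rw [ih, stepB_eq_flatMap, List.flatMap_assoc]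
    apply List.flatMap_congr  -- pointwise: the two children's DFS is goB (j+1)
    intro zp _
    have hrem : ((j : Nat) + 1 : Int) - 1 = (j : Int) := by ring
    simp only [goB, List.flatMap_append, hrem]
    congr 1
    · by_cases h : zp.1 > 0 <;> simp [h]
    · by_cases h : (j : Int) ≥ zp.1 <;> simp [h]

-- B's frontier fold equals the DFS view
theorem kbits_alt_eq_goB (n k : Int) : kbits_alt n k = goB (max n 0).toNat k [] := by
  show ((((List.range (max n 0).toNat).foldl
      (fun st i => stepB ((((max n 0).toNat : Nat) : Int) - (i : Nat)) st) [(k, [])]).filter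
        (fun zp => zp.1 = 0)).map (fun zp => String.mk zp.2)) = _
  rw [fold_eq_applySteps, applySteps_harvest]
  simp

-- ===== VERDICT (by name: the statement is the Claim_ definition above) =====
theorem kbits_spec : Claim_equal_kbits := by
  intro n k _ hk
  unfold Spec_kbits
  rw [kbits_alt_eq_goB, goB_eq (max n 0).toNat 0 k [] hk]
  simp only [List.nil_append]
  have hr : PySem.List.pyRange 0 (0 + (((max n 0).toNat : Nat) : Int)) 1 = PySem.List.pyRange 0 n 1 := by
    rw [PySem.List.pyRange_one, PySem.List.pyRange_one]
    have : ((0 + (((max n 0).toNat : Nat) : Int)) - 0).toNat = ((n : Int) - 0).toNat := by omega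
    rw [this]
  rw [hr]
  exact kbits_eq_render n k
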